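-- pv_equiv track=rewrite | github.com/samuelmohr/adventofcode2023 | day05/solve.py | translate_item_range
-- ===== SOURCE A (Python) =====
-- def translate_item_range(mappings: list[list[int]], position: list[int]) -> list[list[int]]:
--     assert(len(position)==2)
--     for mapping in mappings:
--         assert(len(mapping)==3)
--         if position[0] in range(mapping[1],mapping[1]+mapping[2]):
--             end=position[0]+position[1]
--             if end<=mapping[1]+mapping[2]:
--                 return [[mapping[0]+position[0]-mapping[1],position[1]]]
--             else:
--                 length=mapping[1]+mapping[2]-position[0]
--                 out=translate_item_range(mappings, [position[0]+length,position[1]-length])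
--                 out.append([mapping[0]+position[0]-mapping[1],length])
--                 return out
--     starts=[mapping[0] for mapping in mappings]
--     bigger_starts=[i for i in starts if i>position[0]]
--     if bigger_starts:
--         next=min(bigger_starts)
--         out=translate_item_range(mappings,[next,position[1]+position[0]-next])
--         out.append([position[0],next-position[0]])
--         return out
--     else:
--         return [position]
-- ===== SOURCE B (Python) =====
-- def translate_item_range(mappings: list[list[int]], position: list[int]) -> list[list[int]]:
--     assert len(position) == 2
--     assert all(len(m) == 3 for m in mappings)
--     cur, rem = position
--     out = []
--     while True:
--         for dst, src, n in mappings: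
--             if src <= cur < src + n:
--                 if cur + rem <= src + n:
--                     out.append([dst + cur - src, rem])
--                     out.reverse()
--                     return out
--                 take = src + n - cur
--                 out.append([dst + cur - src, take])
--                 cur += take
--                 rem -= take
--                 break
--         else:
--             bigger = [m[0] for m in mappings if m[0] > cur]
--             if not bigger:
--                 out.append([cur, rem])
--                 out.reverse()
--                 return out
--             nxt = min(bigger)
--             out.append([cur, nxt - cur])
--             rem += cur - nxt
--             cur = nxt
-- ===== Notes on version B (the rewrite author's own statement) =====
-- stated objective: alternative
-- what changed: Replaced A's linear recursion (which appends each segment after the recursive call, yielding a right-to-left result) with an explicit while loop maintaining cur/rem and an accumulator list that is built left-to-right and reversed once at the end.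
-- outside the precondition, e.g. on translate_item_range([[0, 0, 5], [1]], [0, 3]): A returns [[0, 3]], B raises AssertionError
import Mathlib
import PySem

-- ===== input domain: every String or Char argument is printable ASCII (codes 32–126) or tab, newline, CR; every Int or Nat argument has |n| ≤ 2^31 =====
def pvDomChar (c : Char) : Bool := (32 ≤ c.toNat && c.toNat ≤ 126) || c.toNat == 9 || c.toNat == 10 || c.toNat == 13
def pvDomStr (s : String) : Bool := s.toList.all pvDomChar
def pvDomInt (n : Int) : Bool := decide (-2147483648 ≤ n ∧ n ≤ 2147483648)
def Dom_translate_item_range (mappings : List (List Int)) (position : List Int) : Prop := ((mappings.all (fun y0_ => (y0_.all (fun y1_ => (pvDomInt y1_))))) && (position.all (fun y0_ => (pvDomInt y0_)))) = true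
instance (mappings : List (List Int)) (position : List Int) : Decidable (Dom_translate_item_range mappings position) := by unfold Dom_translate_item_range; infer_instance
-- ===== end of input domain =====

-- B rewrites A's linear recursion as an explicit loop with an accumulator reversed at the end
-- (objective: alternative); the return value is proved equal on all well-shaped inputs.

-- ===== PORT A =====

-- termination measure shared by both ports: the number of candidate jump targets
-- (source-range ends and destination starts) strictly above the current position
def pvTargets (mappings : List (List Int)) : List Int :=
  mappings.flatMap (fun m =>
    [PySem.List.pyGetD m 0 0, PySem.List.pyGetD m 1 0 + PySem.List.pyGetD m 2 0])

def pvMeasure (mappings : List (List Int)) (c : Int) : Nat :=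
  ((pvTargets mappings).filter (fun x => decide (c < x))).length

-- every jump goes to a strictly larger member of pvTargets, so the measure drops
theorem pvMeasure_dec (S : List Int) (c c' : Int) (h1 : c < c') (h2 : c' ∈ S) :
    (S.filter (fun x => decide (c' < x))).length < (S.filter (fun x => decide (c < x))).length := by
  induction S with
  | nil => cases h2
  | cons a t ih =>
    have hmono : (t.filter (fun x => decide (c' < x))).length ≤
        (t.filter (fun x => decide (c < x))).length := by
      refine (List.monotone_filter_right t ?_).length_le
      intro x hx
      simp only [decide_eq_true_eq] at hx ⊢
      omega
    rcases List.mem_cons.1 h2 with heq | h2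
    · simp only [List.filter_cons, decide_eq_true_eq]
      rw [if_pos (show c < a by omega), if_neg (show ¬ (c' < a) by omega)]
      simp only [List.length_cons]
      omega
    · have ht := ih h2
      simp only [List.filter_cons, decide_eq_true_eq]
      by_cases hca : c' < a
      · rw [if_pos hca, if_pos (show c < a by omega)]
        simp only [List.length_cons]
        omega
      · rw [if_neg hca]
        by_cases hcb : c < a
        · rw [if_pos hcb]
          simp only [List.length_cons]
          omega
        · rw [if_neg hcb]
          omega

-- port of A's for-loop: first mapping whose source range contains p0
def pvFindA (mappings : List (List Int)) (p0 : Int) : Option (List Int) :=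
  match mappings with
  | [] => none
  | m :: rest =>
    if PySem.List.pyGetD m 1 0 ≤ p0 ∧
        p0 < PySem.List.pyGetD m 1 0 + PySem.List.pyGetD m 2 0 then some m
    else pvFindA rest p0

theorem pvFindA_some {mappings : List (List Int)} {p0 : Int} {m : List Int}
    (h : pvFindA mappings p0 = some m) :
    m ∈ mappings ∧ p0 < PySem.List.pyGetD m 1 0 + PySem.List.pyGetD m 2 0 := by
  induction mappings with
  | nil => simp [pvFindA] at h
  | cons a t ih =>
    rw [pvFindA] at h
    split at h
    · cases h
      exact ⟨List.mem_cons_self, by omega⟩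
    · have := ih h
      exact ⟨List.mem_cons_of_mem _ this.1, this.2⟩

theorem pvEnd_mem_targets {mappings : List (List Int)} {m : List Int} (h : m ∈ mappings) :
    PySem.List.pyGetD m 1 0 + PySem.List.pyGetD m 2 0 ∈ pvTargets mappings :=
  List.mem_flatMap.2 ⟨m, h, by simp⟩

theorem pvStart_mem_targets {mappings : List (List Int)} {m : List Int} (h : m ∈ mappings) :
    PySem.List.pyGetD m 0 0 ∈ pvTargets mappings :=
  List.mem_flatMap.2 ⟨m, h, by simp⟩

def translate_item_range (mappings : List (List Int)) (position : List Int) : List (List Int) :=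
  let p0 := PySem.List.pyGetD position 0 0
  let p1 := PySem.List.pyGetD position 1 0
  match hf : pvFindA mappings p0 with
  | some m =>
    let d := PySem.List.pyGetD m 0 0
    let s := PySem.List.pyGetD m 1 0
    let n := PySem.List.pyGetD m 2 0
    if p0 + p1 ≤ s + n then [[d + p0 - s, p1]]
    else
      let len := s + n - p0
      translate_item_range mappings [p0 + len, p1 - len] ++ [[d + p0 - s, len]]
  | none =>
    let starts := mappings.map (fun m => PySem.List.pyGetD m 0 0)
    let bigger := starts.filter (fun i => decide (p0 < i))
    match hm : PySem.List.min? bigger (fun x => x) with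
    | some nxt => translate_item_range mappings [nxt, p1 + p0 - nxt] ++ [[p0, nxt - p0]]
    | none => [position]
termination_by pvMeasure mappings (PySem.List.pyGetD position 0 0)
decreasing_by
  · have hm := pvFindA_some hf
    simp only [pvMeasure, PySem.List.pyGetD_zero_cons]
    have heq : PySem.List.pyGetD position 0 0 +
        (PySem.List.pyGetD m 1 0 + PySem.List.pyGetD m 2 0 - PySem.List.pyGetD position 0 0) =
        PySem.List.pyGetD m 1 0 + PySem.List.pyGetD m 2 0 := by ring
    rw [heq]
    exact pvMeasure_dec _ _ _ hm.2 (pvEnd_mem_targets hm.1)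
  · have hmem := PySem.List.min?_mem hm
    have hgt : PySem.List.pyGetD position 0 0 < nxt := by
      have := List.of_mem_filter hmem
      simpa using this
    have hstart : nxt ∈ pvTargets mappings := by
      have h2 := List.mem_of_mem_filter hmem
      rcases List.mem_map.1 h2 with ⟨m, hmm, rfl⟩
      first
      | exact pvStart_mem_targets hmm
      | exact pvStart_mem_targets (by simpa using m.2)
    simp only [pvMeasure, PySem.List.pyGetD_zero_cons]
    exact pvMeasure_dec _ _ _ hgt hstart

-- ===== PORT B =====

-- port of Source B's inner for/else scan: first mapping whose source range contains cur
def pvFindB (mappings : List (List Int)) (cur : Int) : Option (List Int) :=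
  match mappings with
  | [] => none
  | m :: rest =>
    if PySem.List.pyGetD m 1 0 ≤ cur ∧
        cur < PySem.List.pyGetD m 1 0 + PySem.List.pyGetD m 2 0 then some m
    else pvFindB rest cur

theorem pvFindB_eq_pvFindA (mappings : List (List Int)) (c : Int) :
    pvFindB mappings c = pvFindA mappings c := by
  induction mappings with
  | nil => rfl
  | cons a t ih => rw [pvFindB, pvFindA, ih]

-- port of Source B's comprehension [m[0] for m in mappings if m[0] > cur]
def pvBiggerB (mappings : List (List Int)) (cur : Int) : List Int :=
  (mappings.filter (fun m => decide (cur < PySem.List.pyGetD m 0 0))).map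
    (fun m => PySem.List.pyGetD m 0 0)

theorem pvBiggerB_mem {mappings : List (List Int)} {cur x : Int}
    (h : x ∈ pvBiggerB mappings cur) : cur < x ∧ x ∈ pvTargets mappings := by
  rcases List.mem_map.1 h with ⟨m, hmm, rfl⟩
  refine ⟨by simpa using List.of_mem_filter hmm,
    pvStart_mem_targets (List.mem_of_mem_filter hmm)⟩

-- port of Source B's while loop; `out` is appended to on the right and reversed on return
def pvLoop (mappings : List (List Int)) (cur rem : Int) (out : List (List Int)) :
    List (List Int) :=
  match hf : pvFindB mappings cur with
  | some m =>
    let dst := PySem.List.pyGetD m 0 0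
    let src := PySem.List.pyGetD m 1 0
    let n := PySem.List.pyGetD m 2 0
    if cur + rem ≤ src + n then (out ++ [[dst + cur - src, rem]]).reverse
    else
      let take := src + n - cur
      pvLoop mappings (cur + take) (rem - take) (out ++ [[dst + cur - src, take]])
  | none =>
    let bigger := pvBiggerB mappings cur
    match hm : PySem.List.min? bigger (fun x => x) with
    | none => (out ++ [[cur, rem]]).reverse
    | some nxt => pvLoop mappings nxt (rem + cur - nxt) (out ++ [[cur, nxt - cur]])
termination_by pvMeasure mappings cur
decreasing_by
  · have hm := pvFindA_some ((pvFindB_eq_pvFindA mappings cur) ▸ hf)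
    simp only [pvMeasure]
    have heq : cur + (PySem.List.pyGetD m 1 0 + PySem.List.pyGetD m 2 0 - cur) =
        PySem.List.pyGetD m 1 0 + PySem.List.pyGetD m 2 0 := by ring
    rw [heq]
    exact pvMeasure_dec _ _ _ hm.2 (pvEnd_mem_targets hm.1)
  · have hmem := pvBiggerB_mem (PySem.List.min?_mem hm)
    simp only [pvMeasure]
    exact pvMeasure_dec _ _ _ hmem.1 hmem.2

def translate_item_range_alt (mappings : List (List Int)) (position : List Int) :
    List (List Int) :=
  pvLoop mappings (PySem.List.pyGetD position 0 0) (PySem.List.pyGetD position 1 0) []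

-- ===== PRECONDITION & SPEC =====
-- Pre_ excludes inputs where a Python assert fires (position not of length 2, a mapping not of
-- length 3); it is slightly narrower than A's raise set: A can return despite a malformed
-- mapping listed after a fully-covering one, where B's up-front assert raises.
def Pre_translate_item_range (mappings : List (List Int)) (position : List Int) : Prop :=
  position.length = 2 ∧ ∀ m ∈ mappings, m.length = 3
instance (mappings : List (List Int)) (position : List Int) :
    Decidable (Pre_translate_item_range mappings position) := by
  unfold Pre_translate_item_range; infer_instance

def pvWitness_translate_item_range : List (List Int) × List Int :=
  ([[50, 98, 2], [52, 50, 48]], [79, 14])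

def Spec_translate_item_range (mappings : List (List Int)) (position : List Int)
    (out : List (List Int)) : Prop := out = translate_item_range_alt mappings position
instance (mappings : List (List Int)) (position : List Int) (out : List (List Int)) :
    Decidable (Spec_translate_item_range mappings position out) := by
  unfold Spec_translate_item_range; infer_instance

-- ===== CLAIM (what is proved, stated in full; the proofs are below) =====
def Claim_equal_translate_item_range : Prop :=
  ∀ (mappings : List (List Int)) (position : List Int),
    Dom_translate_item_range mappings position →
    Pre_translate_item_range mappings position →
    Spec_translate_item_range mappings position (translate_item_range mappings position)

-- ===== LEMMAS AND PROOFS =====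

theorem pvBiggerB_eq (mappings : List (List Int)) (cur : Int) :
    pvBiggerB mappings cur =
      (mappings.map (fun m => PySem.List.pyGetD m 0 0)).filter (fun i => decide (cur < i)) := by
  simp [pvBiggerB, List.filter_map, Function.comp_def]


-- loop invariant: B's loop equals A's recursion on [cur, rem] followed by the reversed accumulator
theorem pvLoop_eq (mappings : List (List Int)) :
    ∀ (cur rem : Int) (out : List (List Int)),
      pvLoop mappings cur rem out =
        translate_item_range mappings [cur, rem] ++ out.reverse := by
  intro cur rem out
  induction cur, rem, out using pvLoop.induct mappings with
  | case1 cur rem out m hf _ _ hle =>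
    rw [pvLoop, translate_item_range,
      show PySem.List.pyGetD [cur, rem] 0 0 = cur from by rw [PySem.List.pyGetD_zero_cons],
      show PySem.List.pyGetD [cur, rem] 1 0 = rem from by simp [PySem.List.pyGetD_ofNat'],
      ← pvFindB_eq_pvFindA mappings cur, hf]
    simp only []
    have hle' : cur + rem ≤ PySem.List.pyGetD m 1 0 + PySem.List.pyGetD m 2 0 := hle
    rw [if_pos hle']
    rw [if_pos hle']
    simp
  | case2 cur rem out m hf d sv n hle tk ih =>
    rw [pvLoop, translate_item_range,
      show PySem.List.pyGetD [cur, rem] 0 0 = cur from by rw [PySem.List.pyGetD_zero_cons],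
      show PySem.List.pyGetD [cur, rem] 1 0 = rem from by simp [PySem.List.pyGetD_ofNat'],
      ← pvFindB_eq_pvFindA mappings cur, hf]
    simp only []
    have hle' : ¬ cur + rem ≤ PySem.List.pyGetD m 1 0 + PySem.List.pyGetD m 2 0 := hle
    rw [if_neg hle']
    rw [if_neg hle', ih]
    have harg : cur + tk = PySem.List.pyGetD m 1 0 + PySem.List.pyGetD m 2 0 := by
      show cur + (PySem.List.pyGetD m 1 0 + PySem.List.pyGetD m 2 0 - cur) = _
      ring
    rw [harg]
    simp only [List.reverse_append, List.reverse_cons, List.reverse_nil, List.nil_append,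
      List.append_assoc, List.cons_append]
    rfl
  | case3 cur rem out hf _ hm =>
    rw [pvLoop, translate_item_range,
      show PySem.List.pyGetD [cur, rem] 0 0 = cur from by rw [PySem.List.pyGetD_zero_cons],
      show PySem.List.pyGetD [cur, rem] 1 0 = rem from by simp [PySem.List.pyGetD_ofNat'],
      ← pvFindB_eq_pvFindA mappings cur, hf]
    simp only []
    rw [show ((mappings.map (fun m => PySem.List.pyGetD m 0 0)).filter
          (fun i => decide (cur < i))) = pvBiggerB mappings cur from (pvBiggerB_eq mappings cur).symm,
      hm]
    simp
  | case4 cur rem out hf _ nxt hm ih =>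
    rw [pvLoop, translate_item_range,
      show PySem.List.pyGetD [cur, rem] 0 0 = cur from by rw [PySem.List.pyGetD_zero_cons],
      show PySem.List.pyGetD [cur, rem] 1 0 = rem from by simp [PySem.List.pyGetD_ofNat'],
      ← pvFindB_eq_pvFindA mappings cur, hf]
    simp only []
    rw [show ((mappings.map (fun m => PySem.List.pyGetD m 0 0)).filter
          (fun i => decide (cur < i))) = pvBiggerB mappings cur from (pvBiggerB_eq mappings cur).symm,
      hm]
    simp only []
    rw [ih]
    simp

-- ===== VERDICT (by name: the statement is the Claim_ definition above) =====
theorem translate_item_range_spec : Claim_equal_translate_item_range := by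
  intro mappings position _ hpre
  unfold Spec_translate_item_range translate_item_range_alt
  match position, hpre.1 with
  | [a, b], _ =>
    simp only [PySem.List.pyGetD_ofNat', List.getD_cons_succ, List.getD_cons_zero]
    rw [pvLoop_eq]
    simp
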